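-- pv_equiv track=rewrite | github.com/gerstudent/Unified-State-Exam | 17/data/17_solve.py | f
-- ===== SOURCE A (Python) =====
-- def f(start, end):
--     if start == end:
--         return 1
--     if start < end:
--         return 0
--     mn = min([x for x in map(int, str(start)) if x != 0])
--     rem4 = start % 4
--     res = f(start - 2, end) + f(start - mn, end)
--     if rem4 != 0:
--         res += f(start - rem4, end)
--     return res
-- ===== SOURCE B (Python) =====
-- def f(start, end):
--     # Bottom-up DP over the values end..start; vals[k] holds the count for value end + k.
--     if start < end:
--         return 0
--     vals = []
--     def get(u):
--         return vals[u - end] if u >= end else 0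
--     for v in range(end, start + 1):
--         if v == end:
--             vals.append(1)
--             continue
--         mn = min(d for d in map(int, str(v)) if d != 0)
--         r = v % 4
--         total = get(v - 2) + get(v - mn)
--         if r != 0:
--             total += get(v - r)
--         vals.append(total)
--     return vals[start - end]
-- ===== Notes on version B (the rewrite author's own statement) =====
-- stated objective: alternative
-- what changed: Replaces the naive triple-branching recursion with a bottom-up dynamic program that tabulates the count for every value from end up to start in a list, computing each value once.
import Mathlib
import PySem

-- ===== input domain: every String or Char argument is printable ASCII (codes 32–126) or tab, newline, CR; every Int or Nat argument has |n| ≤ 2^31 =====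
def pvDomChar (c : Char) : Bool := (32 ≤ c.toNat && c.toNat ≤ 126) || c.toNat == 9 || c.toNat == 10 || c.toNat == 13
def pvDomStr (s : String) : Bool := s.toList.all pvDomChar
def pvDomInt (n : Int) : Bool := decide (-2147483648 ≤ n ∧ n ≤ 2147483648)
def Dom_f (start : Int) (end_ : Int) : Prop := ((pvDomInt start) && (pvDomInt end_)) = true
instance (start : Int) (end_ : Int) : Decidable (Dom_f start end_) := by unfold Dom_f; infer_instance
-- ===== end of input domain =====

-- B replaces A's triple-branching recursion by a bottom-up DP table over end..start (alternative algorithm; each value computed once).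


-- ===== PORT A =====
-- min([x for x in map(int, str(n)) if x != 0]); int(c) is ported as c.toNat - 48, exact for the
-- digit characters str(n) produces for n ≥ 1.  The outer 'max 1' is a totality/termination guard:
-- it changes the value only where the Python RAISES ValueError (n ≤ 0: '-' char or empty min),
-- which lies outside Pre_f.
def minNZDigit (n : Int) : Int :=
  max 1 (((PySem.List.min?
      (((PySem.Int.toStr n).toList.map (fun c => ((c.toNat : Int) - 48))).filter (fun x => x != 0))
      (fun x => x)).getD 1))

def f (start : Int) (end_ : Int) : Int :=
  if start = end_ then 1
  else if start < end_ then 0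
  else
    let mn := minNZDigit start
    let rem4 := PySem.Int.mod start 4
    let res := f (start - 2) end_ + f (start - mn) end_
    if rem4 ≠ 0 then res + f (start - rem4) end_ else res
termination_by (start - end_).toNat
decreasing_by
  all_goals
    have h1 : (1:Int) ≤ minNZDigit start := le_max_left _ _
    have h2 : 0 ≤ PySem.Int.mod start 4 := by
      rw [PySem.Int.mod_eq_emod_of_pos (by norm_num)]
      exact Int.emod_nonneg start (by norm_num)
    have h3 : PySem.Int.mod start 4 < 4 := by
      rw [PySem.Int.mod_eq_emod_of_pos (by norm_num)]
      exact Int.emod_lt_of_pos start (by norm_num)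
    omega

-- ===== PORT B =====
-- Source B's get(u): vals[u - end] if u >= end else 0 (the index is always < len(vals) at each use)
def fGet (end_ : Int) (vals : Array Int) (u : Int) : Int :=
  if end_ ≤ u then vals.getD (u - end_).toNat 0 else 0

-- one loop iteration of Source B: append vals[v - end]
def fStep (end_ : Int) (vals : Array Int) (v : Int) : Array Int :=
  if v = end_ then vals.push 1
  else
    -- minNZDigit: same digit expression as A's helper (shared); its 'max 1' guard again only
    -- matters where the Python raises (v ≤ 0, outside Pre_f).
    let mn := minNZDigit v
    let r := PySem.Int.mod v 4
    let total := fGet end_ vals (v - 2) + fGet end_ vals (v - mn)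
    let total := if r ≠ 0 then total + fGet end_ vals (v - r) else total
    vals.push total

def f_alt (start : Int) (end_ : Int) : Int :=
  if start < end_ then 0
  else
    let vals := (PySem.List.pyRange end_ (start + 1) 1).foldl (fStep end_) #[]
    -- vals[start - end]: the index is nonnegative and in range here, so getD is exact
    vals.getD (start - end_).toNat 0

-- ===== PRECONDITION & SPEC =====
-- Pre_f excludes exactly the inputs where the Python A raises ValueError: end_ < 0 together with
-- start > end_ makes the recursion reach a value v with end_ < v ≤ 0, whose digit list is empty
-- or contains '-'.  (B also raises there.)
def Pre_f (start : Int) (end_ : Int) : Prop := start ≤ end_ ∨ 0 ≤ end_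
instance (start : Int) (end_ : Int) : Decidable (Pre_f start end_) := by unfold Pre_f; infer_instance
def pvWitness_f : Int × Int := (5, 0)

def Spec_f (start : Int) (end_ : Int) (out : Int) : Prop := out = f_alt start end_
instance (start : Int) (end_ : Int) (out : Int) : Decidable (Spec_f start end_ out) := by unfold Spec_f; infer_instance

-- ===== CLAIM (what is proved, stated in full; the proofs are below) =====
def Claim_equal_f : Prop := ∀ (start : Int) (end_ : Int), Dom_f start end_ → Pre_f start end_ → Spec_f start end_ (f start end_)

-- ===== LEMMAS AND PROOFS =====

lemma f_eq_of_lt (u end_ : Int) (h : u < end_) : f u end_ = 0 := by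
  rw [f]
  simp [show u ≠ end_ by omega, h]

lemma f_self (end_ : Int) : f end_ end_ = 1 := by
  rw [f]; simp

lemma f_unfold (w end_ : Int) (h : end_ < w) :
    f w end_ =
      (if PySem.Int.mod w 4 ≠ 0
        then f (w - 2) end_ + f (w - minNZDigit w) end_ + f (w - PySem.Int.mod w 4) end_
        else f (w - 2) end_ + f (w - minNZDigit w) end_) := by
  rw [f]
  simp [show ¬ w = end_ by omega, show ¬ w < end_ by omega]

lemma arr_invariant (end_ : Int) (n : Nat) :
    ((PySem.List.pyRange end_ (end_ + n) 1).foldl (fStep end_) #[]).size = n ∧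
    ∀ k : Nat, k < n →
      ((PySem.List.pyRange end_ (end_ + n) 1).foldl (fStep end_) #[]).getD k 0 = f (end_ + k) end_ := by
  induction n with
  | zero =>
    rw [PySem.List.pyRange_one_eq_nil (by omega)]
    exact ⟨rfl, fun k hk => absurd hk (by omega)⟩
  | succ n ih =>
    rw [show ((n + 1 : Nat) : Int) = (n : Int) + 1 by push_cast; ring,
        show end_ + ((n : Int) + 1) = (end_ + n) + 1 by ring,
        PySem.List.pyRange_one_succ_right (by omega), List.foldl_append]
    simp only [List.foldl]
    set A := (PySem.List.pyRange end_ (end_ + n) 1).foldl (fStep end_) #[] with hA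
    obtain ⟨hsz, ihk⟩ := ih
    have key : ∀ u : Int, u < end_ + n → fGet end_ A u = f u end_ := by
      intro u hu
      unfold fGet
      by_cases h : end_ ≤ u
      · rw [if_pos h]
        have hk : (u - end_).toNat < n := by omega
        have := ihk _ hk
        rw [show end_ + (((u - end_).toNat : Nat) : Int) = u by omega] at this
        exact this
      · rw [if_neg h]
        exact (f_eq_of_lt u end_ (by omega)).symm
    have hgetD_push : ∀ (x : Int) (k : Nat), k < n + 1 →
        (A.push x).getD k 0 = if k < n then A.getD k 0 else x := by
      intro x k hk
      by_cases h : k < n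
      · rw [if_pos h]
        simp [Array.getD, Array.size_push, hsz, h, Nat.lt_succ_of_lt h,
              Array.getElem_push_lt]
      · have hkn : k = n := by omega
        subst hkn
        rw [if_neg (by omega)]
        simp [Array.getD, Array.size_push, hsz, Array.getElem_push]
    by_cases hw : (end_ + (n : Int)) = end_
    · -- this iteration is the first one: it appends vals[0] = 1
      rw [fStep, if_pos hw]
      refine ⟨by simp [Array.size_push, hsz], fun k hk => ?_⟩
      rw [hgetD_push 1 k hk]
      have hn0 : n = 0 := by omega
      subst hn0
      rw [if_neg (by omega), show end_ + ((k : Nat) : Int) = end_ by omega, f_self]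
    · -- a genuine DP step: vals[n] is filled from the three already-tabulated entries
      rw [fStep, if_neg hw]
      refine ⟨by simp [Array.size_push, hsz], fun k hk => ?_⟩
      rw [hgetD_push _ k hk]
      by_cases h : k < n
      · rw [if_pos h]
        exact ihk k h
      · rw [if_neg h]
        have hkn : ((k : Nat) : Int) = (n : Int) := by omega
        rw [hkn]
        have hmn : (1 : Int) ≤ minNZDigit (end_ + n) := le_max_left _ _
        have hmod0 : 0 ≤ PySem.Int.mod (end_ + (n:Int)) 4 := by
          rw [PySem.Int.mod_eq_emod_of_pos (by norm_num)]
          exact Int.emod_nonneg _ (by norm_num)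
        rw [f_unfold (end_ + n) end_ (by omega),
            key (end_ + n - 2) (by omega), key (end_ + n - minNZDigit (end_ + n)) (by omega)]
        by_cases hr : PySem.Int.mod (end_ + (n:Int)) 4 ≠ 0
        · rw [if_pos hr, if_pos hr, key (end_ + n - PySem.Int.mod (end_ + n) 4) (by omega)]
        · rw [if_neg hr, if_neg hr]

-- ===== VERDICT (by name: the statement is the Claim_ definition above) =====
theorem f_spec : Claim_equal_f := by
  intro start end_ _ _
  unfold Spec_f f_alt
  by_cases hlt : start < end_
  · rw [if_pos hlt, f_eq_of_lt start end_ hlt]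
  · rw [if_neg hlt]
    have hn : end_ + ((start + 1 - end_).toNat : Int) = start + 1 := by omega
    obtain ⟨hsz, ihk⟩ := arr_invariant end_ (start + 1 - end_).toNat
    rw [hn] at ihk
    have := ihk (start - end_).toNat (by omega)
    rw [show end_ + (((start - end_).toNat : Nat) : Int) = start by omega] at this
    rw [hn] at hsz
    exact this.symm
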